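-- pv_equiv track=rewrite | github.com/barvaliyavishal/DataStructure | CodeChef/Vaccine2.py | vaccine2
-- ===== SOURCE A (Python) =====
-- def vaccine2(age,n,d):
--     risk=0;
--     notrisk=0;
--     for i in age:
--         if i > 9 and i < 80:
--             notrisk+=1;
--         else:
--             risk+=1;
--     total=0;
--     while(risk>0):
--         total+=1;
--         risk-=d;
--     while(notrisk>0):
--         total+=1;
--         notrisk-=d;
--     return total;
-- ===== SOURCE B (Python) =====
-- def vaccine2(age, n, d):
--     notrisk = sum(1 for i in age if 9 < i < 80)
--     risk = len(age) - notrisk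
--     return -(-risk // d) + -(-notrisk // d)
-- ===== Notes on version B (the rewrite author's own statement) =====
-- stated objective: simpler
-- what changed: Replaced the two subtraction while-loops with closed-form ceiling divisions ceil(risk/d)+ceil(notrisk/d), and the two-counter loop with a single filtered count.
-- outside the precondition, e.g. on vaccine2([], 0, 0): A returns 0, B raises ZeroDivisionError
import Mathlib
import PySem

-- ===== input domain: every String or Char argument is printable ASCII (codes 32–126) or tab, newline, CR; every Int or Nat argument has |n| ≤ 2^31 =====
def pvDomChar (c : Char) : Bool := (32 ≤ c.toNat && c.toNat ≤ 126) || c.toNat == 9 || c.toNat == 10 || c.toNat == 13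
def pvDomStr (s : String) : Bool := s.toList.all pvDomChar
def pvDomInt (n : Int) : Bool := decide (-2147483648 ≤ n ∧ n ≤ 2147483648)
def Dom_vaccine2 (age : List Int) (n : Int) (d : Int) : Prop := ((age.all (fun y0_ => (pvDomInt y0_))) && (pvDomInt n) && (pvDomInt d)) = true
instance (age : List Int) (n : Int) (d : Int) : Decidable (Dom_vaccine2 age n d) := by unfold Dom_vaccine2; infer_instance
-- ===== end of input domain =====

-- B replaces A's two subtraction while-loops by closed-form ceiling divisions (simpler).

-- ===== PORT A =====
-- the while loop 'while r > 0: total += 1; r -= d', fueled; under Pre_ (1 ≤ d) the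
-- fuel r.toNat is always sufficient, so this computes exactly what A's loop computes
def vaccine2Loop (fuel : Nat) (r : Int) (d : Int) (total : Int) : Int :=
  match fuel with
  | 0 => total
  | f + 1 => if r > 0 then vaccine2Loop f (r - d) d (total + 1) else total

def vaccine2 (age : List Int) (n : Int) (d : Int) : Int :=
  let p := age.foldl (fun (p : Int × Int) i =>
    if i > 9 ∧ i < 80 then (p.1, p.2 + 1) else (p.1 + 1, p.2)) (0, 0)
  let total := vaccine2Loop p.1.toNat p.1 d 0
  vaccine2Loop p.2.toNat p.2 d total

-- ===== PORT B =====
def vaccine2_alt (age : List Int) (n : Int) (d : Int) : Int :=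
  let notrisk : Int := (age.filter (fun i => 9 < i ∧ i < 80)).length
  let risk : Int := (age.length : Int) - notrisk
  (-(PySem.Int.floordiv (-risk) d)) + (-(PySem.Int.floordiv (-notrisk) d))

-- ===== PRECONDITION & SPEC =====
-- Pre_ excludes d ≤ 0: there A's while-loops diverge whenever the age list is nonempty,
-- and on the degenerate empty list (where A returns 0) B's ceiling division would divide by d.
def Pre_vaccine2 (age : List Int) (n : Int) (d : Int) : Prop := 1 ≤ d
instance (age : List Int) (n : Int) (d : Int) : Decidable (Pre_vaccine2 age n d) := by unfold Pre_vaccine2; infer_instance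
def pvWitness_vaccine2 : List Int × Int × Int := ([5, 20, 90, 30], 4, 2)

def Spec_vaccine2 (age : List Int) (n : Int) (d : Int) (out : Int) : Prop := out = vaccine2_alt age n d
instance (age : List Int) (n : Int) (d : Int) (out : Int) : Decidable (Spec_vaccine2 age n d out) := by unfold Spec_vaccine2; infer_instance

-- ===== CLAIM (what is proved, stated in full; the proofs are below) =====
def Claim_equal_vaccine2 : Prop := ∀ (age : List Int) (n : Int) (d : Int), Dom_vaccine2 age n d → Pre_vaccine2 age n d → Spec_vaccine2 age n d (vaccine2 age n d)

-- ===== LEMMAS AND PROOFS =====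

-- A's fueled while loop computes t + ceil(r/d) when 1 ≤ d, -d < r ≤ fuel
lemma vaccine2Loop_eq (fuel : Nat) : ∀ (r d t : Int), 1 ≤ d → -d < r → r ≤ (fuel : Int) →
    vaccine2Loop fuel r d t = t + -(PySem.Int.floordiv (-r) d) := by
  induction fuel with
  | zero =>
    intro r d t hd hlo hhi
    have hr0 : r ≤ 0 := by exact_mod_cast hhi
    have : -(PySem.Int.floordiv (-r) d) = 0 := by
      rw [PySem.Int.neg_floordiv_neg_eq_iff_of_pos (by omega)]
      constructor <;> omega
    simp [vaccine2Loop, this]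
  | succ f ih =>
    intro r d t hd hlo hhi
    by_cases hr : r > 0
    · have h1 : vaccine2Loop (f + 1) r d t = vaccine2Loop f (r - d) d (t + 1) := by
        simp [vaccine2Loop, hr]
      rw [h1, ih (r - d) d (t + 1) hd (by omega) (by push_cast; omega)]
      have h2 : PySem.Int.floordiv (-(r - d)) d = PySem.Int.floordiv (-r) d + 1 := by
        have : -(r - d) = -r + 1 * d := by ring
        rw [this, PySem.Int.floordiv_eq_ediv_of_pos (by omega),
            PySem.Int.floordiv_eq_ediv_of_pos (by omega),
            Int.add_mul_ediv_right _ _ (by omega : d ≠ 0)]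
      rw [h2]; ring
    · have : -(PySem.Int.floordiv (-r) d) = 0 := by
        rw [PySem.Int.neg_floordiv_neg_eq_iff_of_pos (by omega)]
        constructor <;> omega
      simp [vaccine2Loop, hr, this]

-- A's counting fold in terms of B's filtered count
lemma vaccine2_fold_eq (age : List Int) : ∀ (r nr : Int),
    age.foldl (fun (p : Int × Int) i =>
      if i > 9 ∧ i < 80 then (p.1, p.2 + 1) else (p.1 + 1, p.2)) (r, nr)
    = (r + ((age.length : Int) - ((age.filter (fun i => 9 < i ∧ i < 80)).length : Int)),
       nr + ((age.filter (fun i => 9 < i ∧ i < 80)).length : Int)) := by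
  induction age with
  | nil => intro r nr; simp
  | cons a as ih =>
    intro r nr
    by_cases h : a > 9 ∧ a < 80
    · rw [List.foldl_cons, if_pos h, ih, List.filter_cons_of_pos (by simpa using h)]
      simp only [List.length_cons, Prod.mk.injEq]
      constructor <;> (push_cast; try ring)
    · rw [List.foldl_cons, if_neg h, ih, List.filter_cons_of_neg (by simpa using h)]
      simp only [List.length_cons, Prod.mk.injEq]
      constructor <;> (push_cast; try ring)

-- ===== VERDICT (by name: the statement is the Claim_ definition above) =====
theorem vaccine2_spec : Claim_equal_vaccine2 := by
  intro age n d _ hpre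
  have hd : (1 : Int) ≤ d := hpre
  unfold Spec_vaccine2 vaccine2 vaccine2_alt
  rw [vaccine2_fold_eq age 0 0]
  simp only [zero_add]
  have hF : (((age.filter (fun i => 9 < i ∧ i < 80)).length : Int)) ≤ (age.length : Int) := by
    exact_mod_cast List.length_filter_le _ _
  rw [vaccine2Loop_eq _ _ _ _ hd (by omega) (Int.self_le_toNat _),
      vaccine2Loop_eq _ _ _ _ hd (by omega) (Int.self_le_toNat _)]
  ring
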